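-- pv_equiv track=rewrite | github.com/siggame/GlogData | file_manip.py | strip_parent_expr_old
-- ===== SOURCE A (Python) =====
-- def strip_parent_expr_old(string):
--     new_string = ""
--     p_count = 0
--     building_exp = False
--     for i in string:
--         if i == '(':
--             p_count += 1
--         elif i == ')':
--             p_count -= 1
--
--         if p_count == 2 and not building_exp:
--             new_string = i
--             building_exp = True
--         elif p_count >= 2 and building_exp:
--             new_string += i
--         elif p_count == 1 and building_exp:
--             new_string += i
--             if p_count == 0:
--                 building_exp = False
--     return new_string
-- ===== SOURCE B (Python) =====
-- def strip_parent_expr_old(string):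
--     # precompute the running parenthesis depth after each character
--     depths = []
--     d = 0
--     for c in string:
--         if c == '(':
--             d += 1
--         elif c == ')':
--             d -= 1
--         depths.append(d)
--     try:
--         start = depths.index(2)
--     except ValueError:
--         return ""
--     return "".join(c for c, dep in zip(string[start:], depths[start:]) if dep >= 1)
-- ===== Notes on version B (the rewrite author's own statement) =====
-- stated objective: alternative
-- what changed: Replaces A's single stateful scan (depth counter + building flag + growing accumulator) by a precompute-then-filter decomposition: one pass records the running depth after each character, the first index of depth 2 is found with list.index, and the result is the characters from that index onward whose recorded depth is >= 1.
import Mathlib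
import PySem

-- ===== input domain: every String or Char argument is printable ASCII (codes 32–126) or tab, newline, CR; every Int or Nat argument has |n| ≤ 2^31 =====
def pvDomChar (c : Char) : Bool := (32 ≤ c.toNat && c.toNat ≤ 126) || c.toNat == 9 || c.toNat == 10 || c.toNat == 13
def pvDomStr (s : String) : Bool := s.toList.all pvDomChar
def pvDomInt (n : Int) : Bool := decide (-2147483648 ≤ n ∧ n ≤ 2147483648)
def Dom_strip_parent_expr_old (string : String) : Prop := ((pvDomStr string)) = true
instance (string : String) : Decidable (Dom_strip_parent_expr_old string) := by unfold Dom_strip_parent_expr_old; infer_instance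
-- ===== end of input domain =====

-- B replaces A's single stateful scan by a precomputed depth table, list.index of depth 2,
-- then a filter keeping characters with depth ≥ 1 (alternative decomposition, same cost).

-- ===== PORT A =====
-- one step of A's loop body over state (new_string, p_count, building_exp)
def pvStepA (st : List Char × Int × Bool) (i : Char) : List Char × Int × Bool :=
  let ns := st.1
  let p_count := if i = '(' then st.2.1 + 1 else if i = ')' then st.2.1 - 1 else st.2.1
  let building_exp := st.2.2
  if p_count = 2 ∧ building_exp = false then ([i], p_count, true)
  else if p_count ≥ 2 ∧ building_exp = true then (ns ++ [i], p_count, building_exp)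
  else if p_count = 1 ∧ building_exp = true then
    (ns ++ [i], p_count, if p_count = 0 then false else building_exp)
  else (ns, p_count, building_exp)

def strip_parent_expr_old (string : String) : String :=
  String.ofList (string.toList.foldl pvStepA ([], 0, false)).1

-- ===== PORT B =====
-- the running-depth table: depth after each character, starting from depth d
def pvDepths (d : Int) (cs : List Char) : List Int :=
  match cs with
  | [] => []
  | c :: cs =>
    let d' := if c = '(' then d + 1 else if c = ')' then d - 1 else d
    d' :: pvDepths d' cs

def strip_parent_expr_old_alt (string : String) : String :=
  let depths := pvDepths 0 string.toList
  match PySem.List.index? depths 2 with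
  | none => ""
  | some start =>
    -- string[start:] / depths[start:] with a nonnegative in-range start = List.drop start
    String.ofList ((((string.toList.drop start).zip (depths.drop start)).filter
      (fun p => p.2 ≥ 1)).map Prod.fst)

-- ===== PRECONDITION & SPEC =====
def Spec_strip_parent_expr_old (string : String) (out : String) : Prop := out = strip_parent_expr_old_alt string
instance (string : String) (out : String) : Decidable (Spec_strip_parent_expr_old string out) := by unfold Spec_strip_parent_expr_old; infer_instance

-- ===== CLAIM (what is proved, stated in full; the proofs are below) =====
def Claim_equal_strip_parent_expr_old : Prop := ∀ (string : String), Dom_strip_parent_expr_old string → Spec_strip_parent_expr_old string (strip_parent_expr_old string)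

-- ===== LEMMAS AND PROOFS =====

-- step characterisations of A's loop body
theorem pvStepA_true (ns : List Char) (pc : Int) (c : Char) :
    pvStepA (ns, pc, true) c =
      ((if (if c = '(' then pc + 1 else if c = ')' then pc - 1 else pc) ≥ 1 then ns ++ [c] else ns),
       (if c = '(' then pc + 1 else if c = ')' then pc - 1 else pc), true) := by
  simp only [pvStepA]
  split_ifs <;> simp_all <;> omega

theorem pvStepA_false (pc : Int) (c : Char) :
    pvStepA ([], pc, false) c =
      (if (if c = '(' then pc + 1 else if c = ')' then pc - 1 else pc) = 2
        then ([c], (if c = '(' then pc + 1 else if c = ')' then pc - 1 else pc), true)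
        else ([], (if c = '(' then pc + 1 else if c = ')' then pc - 1 else pc), false)) := by
  simp only [pvStepA]
  split_ifs <;> simp_all

-- collecting phase: once building_exp is true, A appends exactly the chars whose new depth ≥ 1
theorem pvCollect (cs : List Char) : ∀ (ns : List Char) (pc : Int),
    (cs.foldl pvStepA (ns, pc, true)).1
      = ns ++ ((cs.zip (pvDepths pc cs)).filter (fun p => p.2 ≥ 1)).map Prod.fst := by
  induction cs with
  | nil => intro ns pc; simp
  | cons c cs ih =>
    intro ns pc
    simp only [List.foldl_cons, pvStepA_true, pvDepths, List.zip_cons_cons, List.filter_cons]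
    by_cases h : (if c = '(' then pc + 1 else if c = ')' then pc - 1 else pc) ≥ 1
    · simp [h, ih]
    · simp [h, ih]

-- searching phase: before building starts, A's result matches B's table computation
theorem pvSearch (cs : List Char) : ∀ (pc : Int),
    (cs.foldl pvStepA ([], pc, false)).1
      = match PySem.List.index? (pvDepths pc cs) 2 with
        | none => []
        | some start =>
          (((cs.drop start).zip ((pvDepths pc cs).drop start)).filter
            (fun p => p.2 ≥ 1)).map Prod.fst := by
  induction cs with
  | nil => intro pc; simp [pvDepths, PySem.List.index?]
  | cons c cs ih =>
    intro pc
    have hdep : pvDepths pc (c :: cs)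
        = (if c = '(' then pc + 1 else if c = ')' then pc - 1 else pc)
          :: pvDepths (if c = '(' then pc + 1 else if c = ')' then pc - 1 else pc) cs := by
      simp [pvDepths]
    by_cases h2 : (if c = '(' then pc + 1 else if c = ')' then pc - 1 else pc) = 2
    · simp only [List.foldl_cons, pvStepA_false, if_pos h2]
      rw [pvCollect, hdep, h2, PySem.List.index?_cons_self]
      simp
    · simp only [List.foldl_cons, pvStepA_false, if_neg h2, ih]
      rw [hdep, PySem.List.index?_cons_of_ne _ h2]
      cases PySem.List.index? (pvDepths (if c = '(' then pc + 1 else if c = ')' then pc - 1 else pc) cs) 2 with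
      | none => simp
      | some k => simp

-- ===== VERDICT (by name: the statement is the Claim_ definition above) =====
theorem strip_parent_expr_old_spec : Claim_equal_strip_parent_expr_old := by
  intro s _
  unfold Spec_strip_parent_expr_old strip_parent_expr_old strip_parent_expr_old_alt
  rw [pvSearch]
  cases h : PySem.List.index? (pvDepths 0 s.toList) 2 <;>
    (rw [PySem.List.index?_eq_idxOf?] at h; simp [h])
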